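-- pv_equiv track=rewrite | github.com/emillynge/python-remoteexecution | remoteexecution/Utils.py | parse_input_str
-- ===== SOURCE A (Python) =====
-- from collections import defaultdict, namedtuple
--
-- def parse_input_str(input_str):
--     quotes = defaultdict(int)
--     pairs = {'(': ')', '[': ']', '{': '}'}
--     input_args = list()
--     curr_arg = ""
--     kwarg = False
--     for char in input_str:
--
--         if char in '([{':
--             quotes[pairs[char]] += 1
--             continue
--
--         if char in ')]}':
--             quotes[char] -= 1
--             if quotes[char] == 0:
--                 del (quotes[char])
--             continue
--
--         if char in '\n\r\t ':
--             continue
--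
--         if char == ',' and not quotes:
--             input_args.append(curr_arg)
--             curr_arg = ''
--             kwarg = False
--             continue
--
--         if char == '=':
--             kwarg = True
--
--         if kwarg:
--             continue
--         curr_arg += char
--     input_args.append(curr_arg)
--     input_args = [a.strip(' ') for a in input_args]
--     if 'self' in input_args:
--         input_args.remove('self')
--     return input_args
-- ===== SOURCE B (Python) =====
-- def parse_input_str(input_str):
--     # Pass 1: split into raw segments at top-level commas (per-closing-bracket
--     # counters, matching A's behaviour on unbalanced brackets).
--     counts = {}
--     pairs = {'(': ')', '[': ']', '{': '}'}
--     segs = []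
--     cur = []
--     for ch in input_str:
--         if ch in '([{':
--             counts[pairs[ch]] = counts.get(pairs[ch], 0) + 1
--             cur.append(ch)
--         elif ch in ')]}':
--             counts[ch] = counts.get(ch, 0) - 1
--             if counts[ch] == 0:
--                 del counts[ch]
--             cur.append(ch)
--         elif ch == ',' and not counts:
--             segs.append(cur)
--             cur = []
--         else:
--             cur.append(ch)
--     segs.append(cur)
--     # Pass 2: per segment, stop at the first '=' and drop brackets/whitespace.
--     args = []
--     for seg in segs:
--         cleaned = []
--         for c in seg:
--             if c == '=':
--                 break
--             if c not in '()[]{}\n\r\t ':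
--                 cleaned.append(c)
--         args.append(''.join(cleaned))
--     if 'self' in args:
--         args.remove('self')
--     return args
-- ===== Notes on version B (the rewrite author's own statement) =====
-- stated objective: alternative
-- what changed: Replaces A's single stateful character loop (kwarg flag, per-char skips, incremental string building) by two passes: pass 1 only splits the string into raw segments at top-level commas, pass 2 cleans each segment independently (truncate at the first '=', drop bracket/whitespace characters).
import Mathlib
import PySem

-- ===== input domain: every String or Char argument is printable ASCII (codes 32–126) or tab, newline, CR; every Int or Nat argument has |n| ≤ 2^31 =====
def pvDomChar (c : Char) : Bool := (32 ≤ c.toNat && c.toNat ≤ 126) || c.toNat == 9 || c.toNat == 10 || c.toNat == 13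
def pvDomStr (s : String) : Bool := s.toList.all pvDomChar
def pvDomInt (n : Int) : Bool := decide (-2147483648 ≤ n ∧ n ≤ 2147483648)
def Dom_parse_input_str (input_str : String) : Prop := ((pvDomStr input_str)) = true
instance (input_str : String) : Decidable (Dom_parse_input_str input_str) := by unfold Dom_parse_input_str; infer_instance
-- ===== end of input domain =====

-- B re-decomposes A's single stateful scan into split-at-top-level-commas followed by
-- a per-segment cleaning pass; same return value, proved equal on all inputs.

-- ===== PORT A =====
-- state: (quotes, input_args, curr_arg, kwarg)
def pvStepA (st : PySem.Dict Char Int × List String × String × Bool) (c : Char) :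
    PySem.Dict Char Int × List String × String × Bool :=
  let (q, args, cur, kw) := st
  if c = '(' ∨ c = '[' ∨ c = '{' then
    -- quotes[pairs[char]] += 1  (pairs is the literal dict {'(' : ')', '[' : ']', '{' : '}'})
    let cl := if c = '(' then ')' else if c = '[' then ']' else '}'
    (q.modify cl 0 (· + 1), args, cur, kw)
  else if c = ')' ∨ c = ']' ∨ c = '}' then
    let q' := q.modify c 0 (· - 1)
    (if q'.getD c 0 = 0 then q'.erase c else q', args, cur, kw)
  else if c = '\n' ∨ c = '\r' ∨ c = '\t' ∨ c = ' ' then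
    (q, args, cur, kw)
  else if c = ',' ∧ q.items = [] then
    (q, args ++ [cur], "", false)
  else
    let kw' := if c = '=' then true else kw
    if kw' then (q, args, cur, kw') else (q, args, cur.push c, kw')

def parse_input_str (input_str : String) : List String :=
  let st := input_str.toList.foldl pvStepA (PySem.Dict.empty, [], "", false)
  let args := st.2.1 ++ [st.2.2.1]
  let args := args.map (fun a => PySem.Str.stripChars a " ")
  if "self" ∈ args then
    match PySem.List.remove? args "self" with
    | some l => l
    | none => args
  else args

-- ===== PORT B =====
-- pass-2 inner loop: stop at the first '=', keep chars outside '()[]{}\n\r\t '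
def pvCleanSeg : List Char → List Char
  | [] => []
  | c :: r =>
    if c = '=' then []
    else if c = '(' ∨ c = ')' ∨ c = '[' ∨ c = ']' ∨ c = '{' ∨ c = '}'
            ∨ c = '\n' ∨ c = '\r' ∨ c = '\t' ∨ c = ' ' then pvCleanSeg r
    else c :: pvCleanSeg r

-- pass-1 state: (counts, segs, cur)
def pvStepB (st : PySem.Dict Char Int × List (List Char) × List Char) (c : Char) :
    PySem.Dict Char Int × List (List Char) × List Char :=
  let (counts, segs, cur) := st
  if c = '(' ∨ c = '[' ∨ c = '{' then
    let cl := if c = '(' then ')' else if c = '[' then ']' else '}'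
    (counts.insert cl (counts.getD cl 0 + 1), segs, cur ++ [c])
  else if c = ')' ∨ c = ']' ∨ c = '}' then
    let d := counts.insert c (counts.getD c 0 - 1)
    (if d.getD c 0 = 0 then d.erase c else d, segs, cur ++ [c])
  else if c = ',' ∧ counts.items = [] then
    (counts, segs ++ [cur], [])
  else
    (counts, segs, cur ++ [c])

def parse_input_str_alt (input_str : String) : List String :=
  let st := input_str.toList.foldl pvStepB (PySem.Dict.empty, [], [])
  let args := (st.2.1 ++ [st.2.2]).map (fun seg => String.ofList (pvCleanSeg seg))
  if "self" ∈ args then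
    match PySem.List.remove? args "self" with
    | some l => l
    | none => args
  else args

-- ===== PRECONDITION & SPEC =====
def Spec_parse_input_str (input_str : String) (out : List String) : Prop := out = parse_input_str_alt input_str
instance (input_str : String) (out : List String) : Decidable (Spec_parse_input_str input_str out) := by unfold Spec_parse_input_str; infer_instance

-- ===== CLAIM (what is proved, stated in full; the proofs are below) =====
def Claim_equal_parse_input_str : Prop := ∀ (input_str : String), Dom_parse_input_str input_str → Spec_parse_input_str input_str (parse_input_str input_str)

-- ===== LEMMAS AND PROOFS =====

theorem pvCleanSeg_append (xs : List Char) (c : Char) :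
    pvCleanSeg (xs ++ [c]) =
      if '=' ∈ xs then pvCleanSeg xs
      else if c = '=' then pvCleanSeg xs
      else if c = '(' ∨ c = ')' ∨ c = '[' ∨ c = ']' ∨ c = '{' ∨ c = '}'
              ∨ c = '\n' ∨ c = '\r' ∨ c = '\t' ∨ c = ' ' then pvCleanSeg xs
      else pvCleanSeg xs ++ [c] := by
  induction xs with
  | nil => simp only [List.nil_append, pvCleanSeg]; split_ifs <;> simp_all
  | cons x r ih =>
    by_cases hx : x = '='
    · simp [pvCleanSeg, hx]
    · simp only [List.cons_append, pvCleanSeg, hx, if_false, List.mem_cons, ih]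
      split_ifs <;> simp_all <;> exact absurd ‹'=' = x›.symm hx

theorem pvCleanSeg_no_space (xs : List Char) : ' ' ∉ pvCleanSeg xs := by
  induction xs with
  | nil => simp [pvCleanSeg]
  | cons x r ih =>
    unfold pvCleanSeg
    split_ifs with h1 h2
    · simp
    · exact ih
    · have : x ≠ ' ' := by rintro rfl; exact h2 (by simp)
      simpa [ih] using fun h => absurd h.symm this

theorem dropWhile_of_none {p : Char → Bool} {l : List Char} (h : ∀ c ∈ l, p c = false) :
    l.dropWhile p = l := by
  cases l with
  | nil => rfl
  | cons x r => simp [List.dropWhile, h x (by simp)]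

theorem strip_clean (xs : List Char) :
    PySem.Str.stripChars (String.ofList (pvCleanSeg xs)) " " = String.ofList (pvCleanSeg xs) := by
  have hlist : (" " : String).toList = [' '] := by rfl
  have h : ∀ c ∈ pvCleanSeg xs, (([' '].contains c : Bool)) = false := by
    intro c hc
    simp only [List.contains_eq_mem, List.mem_singleton, decide_eq_false_iff_not]
    rintro rfl
    exact (pvCleanSeg_no_space xs) hc
  have key : (PySem.Str.stripChars (String.ofList (pvCleanSeg xs)) " ").toList = pvCleanSeg xs := by
    rw [PySem.Str.toList_stripChars, String.toList_ofList, hlist]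
    simp only [PySem.Chars.stripChars]
    rw [dropWhile_of_none h, dropWhile_of_none (by intro c hc; exact h c (List.mem_reverse.mp hc)),
      List.reverse_reverse]
  rw [← String.toList_inj, key, String.toList_ofList]

-- the loop invariant relating A's state to B's state
def pvRel (a : PySem.Dict Char Int × List String × String × Bool)
    (b : PySem.Dict Char Int × List (List Char) × List Char) : Prop :=
  a.1 = b.1 ∧ a.2.1 = b.2.1.map (fun seg => String.ofList (pvCleanSeg seg)) ∧
  a.2.2.1 = String.ofList (pvCleanSeg b.2.2) ∧ a.2.2.2 = decide ('=' ∈ b.2.2)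

theorem pvRel_step (a : PySem.Dict Char Int × List String × String × Bool)
    (b : PySem.Dict Char Int × List (List Char) × List Char) (c : Char)
    (h : pvRel a b) : pvRel (pvStepA a c) (pvStepB b c) := by
  obtain ⟨a1, a2, a3, a4⟩ := a
  obtain ⟨b1, b2, b3⟩ := b
  obtain ⟨h1, h2, h3, h4⟩ := h
  simp only at h1 h2 h3 h4
  subst h1 h2 h3 h4
  unfold pvStepA pvStepB
  by_cases ho : c = '(' ∨ c = '[' ∨ c = '{'
  · have hne : ('=' : Char) ≠ c := by rcases ho with rfl | rfl | rfl <;> decide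
    have hbad : c = '(' ∨ c = ')' ∨ c = '[' ∨ c = ']' ∨ c = '{' ∨ c = '}'
            ∨ c = '\n' ∨ c = '\r' ∨ c = '\t' ∨ c = ' ' := by rcases ho with rfl | rfl | rfl <;> simp
    simp only [ho, if_true]
    refine ⟨rfl, rfl, ?_, ?_⟩
    · simp [pvCleanSeg_append, hbad, Ne.symm hne]
    · simp [hne]
  · by_cases hc : c = ')' ∨ c = ']' ∨ c = '}'
    · have hne : ('=' : Char) ≠ c := by rcases hc with rfl | rfl | rfl <;> decide
      have hbad : c = '(' ∨ c = ')' ∨ c = '[' ∨ c = ']' ∨ c = '{' ∨ c = '}'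
            ∨ c = '\n' ∨ c = '\r' ∨ c = '\t' ∨ c = ' ' := by rcases hc with rfl | rfl | rfl <;> simp
      simp only [ho, if_false, hc, if_true]
      refine ⟨rfl, rfl, ?_, ?_⟩
      · simp [pvCleanSeg_append, hbad, Ne.symm hne]
      · simp [hne]
    · by_cases hw : c = '\n' ∨ c = '\r' ∨ c = '\t' ∨ c = ' '
      · have hne : ('=' : Char) ≠ c := by rcases hw with rfl | rfl | rfl | rfl <;> decide
        have hbad : c = '(' ∨ c = ')' ∨ c = '[' ∨ c = ']' ∨ c = '{' ∨ c = '}'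
            ∨ c = '\n' ∨ c = '\r' ∨ c = '\t' ∨ c = ' ' := by rcases hw with rfl | rfl | rfl | rfl <;> simp
        have hcm : ¬(c = ',' ∧ (a1.items : List (Char × Int)) = []) := by
          rintro ⟨rfl, -⟩; rcases hw with h|h|h|h <;> exact absurd h (by decide)
        simp only [ho, hc, if_false, hw, if_true, hcm]
        refine ⟨rfl, rfl, ?_, ?_⟩
        · simp [pvCleanSeg_append, hbad, Ne.symm hne]
        · simp [hne]
      · by_cases hcm : c = ',' ∧ (a1.items : List (Char × Int)) = []
        · simp only [hcm]
          exact ⟨rfl, by simp, by simp [pvCleanSeg], by simp⟩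
        · simp only [ho, hc, hw, hcm, if_false]
          by_cases he : c = '='
          · subst he
            simp only [if_true]
            refine ⟨rfl, rfl, ?_, by simp⟩
            rw [pvCleanSeg_append]
            split_ifs <;> simp_all
          · have hbad : ¬(c = '(' ∨ c = ')' ∨ c = '[' ∨ c = ']' ∨ c = '{' ∨ c = '}'
                ∨ c = '\n' ∨ c = '\r' ∨ c = '\t' ∨ c = ' ') := by
              rintro (h|h|h|h|h|h|h|h|h|h)
              exacts [ho (Or.inl h), hc (Or.inl h), ho (Or.inr (Or.inl h)),
                hc (Or.inr (Or.inl h)), ho (Or.inr (Or.inr h)), hc (Or.inr (Or.inr h)),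
                hw (Or.inl h), hw (Or.inr (Or.inl h)), hw (Or.inr (Or.inr (Or.inl h))),
                hw (Or.inr (Or.inr (Or.inr h)))]
            simp only [he, if_false]
            by_cases hk : '=' ∈ b3
            · simp only [hk, decide_true, if_true]
              refine ⟨rfl, rfl, ?_, by simp [hk]⟩
              simp [pvCleanSeg_append, hk]
            · simp only [hk, decide_false, Bool.false_eq_true, if_false]
              refine ⟨rfl, rfl, ?_, ?_⟩
              · rw [pvCleanSeg_append]
                simp only [hk, if_false, he, hbad]
                simp [String.push, String.ofList]
              · simpa [hk] using fun h => absurd h.symm he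

theorem pvRel_foldl (l : List Char) (a : PySem.Dict Char Int × List String × String × Bool)
    (b : PySem.Dict Char Int × List (List Char) × List Char) (h : pvRel a b) :
    pvRel (l.foldl pvStepA a) (l.foldl pvStepB b) := by
  induction l generalizing a b with
  | nil => exact h
  | cons c r ih => exact ih _ _ (pvRel_step a b c h)

-- ===== VERDICT (by name: the statement is the Claim_ definition above) =====
theorem parse_input_str_spec : Claim_equal_parse_input_str := by
  intro s _
  unfold Spec_parse_input_str parse_input_str parse_input_str_alt
  have h := pvRel_foldl s.toList (PySem.Dict.empty, [], "", false)
    (PySem.Dict.empty, [], []) ⟨rfl, rfl, by rfl, by simp⟩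
  obtain ⟨h1, h2, h3, h4⟩ := h
  simp only [h2, h3]
  have heq : ((s.toList.foldl pvStepB (PySem.Dict.empty, [], [])).2.1.map
        (fun seg => String.ofList (pvCleanSeg seg)) ++
      [String.ofList (pvCleanSeg (s.toList.foldl pvStepB (PySem.Dict.empty, [], [])).2.2)]).map
        (fun a => PySem.Str.stripChars a " ") =
      ((s.toList.foldl pvStepB (PySem.Dict.empty, [], [])).2.1 ++
        [(s.toList.foldl pvStepB (PySem.Dict.empty, [], [])).2.2]).map
        (fun seg => String.ofList (pvCleanSeg seg)) := by
    simp [List.map_append, List.map_map, Function.comp, strip_clean]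
  rw [heq]
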